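-- pv_equiv track=rewrite | github.com/lovehhf/LeetCode | 全国高校春季编程大赛/决赛/4_有效子数组的数目.py | validSubarrays2
-- ===== SOURCE A (Python) =====
-- def validSubarrays2(nums):
--     """
--     超时
--     :type nums: List[int]
--     :rtype: int
--     """
--     n = len(nums)
--     res = n
--     for i in range(n - 1):
--         for j in range(i + 1, n):
--             if nums[i] <= nums[j]:
--                 res += 1
--             else:
--                 break
--     return res
-- ===== SOURCE B (Python) =====
-- def validSubarrays2(nums):
--     # Monotonic (non-decreasing) stack: after processing each element, the stack
--     # holds exactly the start positions still valid for subarrays ending here.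
--     res = 0
--     stack = []
--     for x in nums:
--         while stack and stack[-1] > x:
--             stack.pop()
--         stack.append(x)
--         res += len(stack)
--     return res
-- ===== Notes on version B (the rewrite author's own statement) =====
-- stated objective: faster
-- what changed: Replaces the quadratic nested scan (for each start, walk right until a smaller element) with a single left-to-right pass over a monotonic stack, counting per position the number of valid starts (the stack size).
import Mathlib
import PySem

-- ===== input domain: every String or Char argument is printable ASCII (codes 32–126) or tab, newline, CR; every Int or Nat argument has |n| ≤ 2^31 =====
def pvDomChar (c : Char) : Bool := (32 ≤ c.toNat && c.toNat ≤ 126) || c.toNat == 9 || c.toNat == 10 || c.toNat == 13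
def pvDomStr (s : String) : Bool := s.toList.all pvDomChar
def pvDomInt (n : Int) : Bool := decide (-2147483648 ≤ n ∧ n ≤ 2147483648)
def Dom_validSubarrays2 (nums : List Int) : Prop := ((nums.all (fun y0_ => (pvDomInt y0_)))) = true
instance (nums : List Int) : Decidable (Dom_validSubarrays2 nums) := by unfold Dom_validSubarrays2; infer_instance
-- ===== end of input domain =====

-- B replaces A's quadratic nested scan with a single monotonic-stack pass (objective: faster).

-- ===== PORT A =====
-- inner 'for j in range(i+1, n)' with break; indices drawn from range are in bounds, so pyGetD's default is never used
def innerA (nums : List Int) (vi : Int) : List Int → Int → Int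
  | [], res => res
  | j :: rest, res =>
    if vi ≤ PySem.List.pyGetD nums j 0 then innerA nums vi rest (res + 1) else res

def validSubarrays2 (nums : List Int) : Int :=
  (PySem.List.pyRange 0 ((nums.length : Int) - 1) 1).foldl
    (fun res i => innerA nums (PySem.List.pyGetD nums i 0)
      (PySem.List.pyRange (i + 1) (nums.length : Int) 1) res) (nums.length : Int)

-- ===== PORT B =====
-- stack represented top-first ('stack[-1]' = head); 'while stack and stack[-1] > x: pop' = dropWhile
def bLoop : List Int → List Int → Int → Int
  | [], _, res => res
  | x :: l, s, res =>
    let s' := x :: s.dropWhile (fun t => decide (x < t))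
    bLoop l s' (res + s'.length)

def validSubarrays2_alt (nums : List Int) : Int := bLoop nums [] 0

-- ===== PRECONDITION & SPEC =====
def Spec_validSubarrays2 (nums : List Int) (out : Int) : Prop := out = validSubarrays2_alt nums
instance (nums : List Int) (out : Int) : Decidable (Spec_validSubarrays2 nums out) := by unfold Spec_validSubarrays2; infer_instance

-- ===== CLAIM (what is proved, stated in full; the proofs are below) =====
def Claim_equal_validSubarrays2 : Prop := ∀ (nums : List Int), Dom_validSubarrays2 nums → Spec_validSubarrays2 nums (validSubarrays2 nums)

-- ===== LEMMAS AND PROOFS =====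

-- common reference value: sum over suffixes of 1 + (length of the run of elements ≥ the head)
def specSum : List Int → Int
  | [] => 0
  | a :: l => 1 + ((l.takeWhile (fun x => decide (a ≤ x))).length : Int) + specSum l

-- ---- B side ----

theorem bLoop_add (l : List Int) : ∀ (s : List Int) (res c : Int),
    bLoop l s (res + c) = bLoop l s res + c := by
  induction l with
  | nil => intro s res c; simp [bLoop]
  | cons x l ih =>
    intro s res c
    simp only [bLoop]
    rw [show res + c + ((x :: s.dropWhile (fun t => decide (x < t))).length : Int)
        = res + ((x :: s.dropWhile (fun t => decide (x < t))).length : Int) + c by ring, ih]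

theorem bLoop_bottom (l : List Int) : ∀ (s : List Int) (a res : Int),
    (∀ t ∈ s, a ≤ t) →
    bLoop l (s ++ [a]) res
      = bLoop l s (res + ((l.takeWhile (fun x => decide (a ≤ x))).length : Int)) := by
  induction l with
  | nil => intro s a res _; simp [bLoop]
  | cons x l ih =>
    intro s a res hs
    by_cases hax : a ≤ x
    · have hdrop : (s ++ [a]).dropWhile (fun t => decide (x < t))
          = s.dropWhile (fun t => decide (x < t)) ++ [a] := by
        rw [List.dropWhile_append]
        rcases hds : s.dropWhile (fun t => decide (x < t)) with _ | ⟨y, ys⟩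
        · simp [List.dropWhile, show ¬ x < a by omega]
        · simp
      simp only [bLoop, hdrop]
      have hs' : ∀ t ∈ x :: s.dropWhile (fun t => decide (x < t)), a ≤ t := by
        intro t ht
        rcases List.mem_cons.mp ht with rfl | ht
        · exact hax
        · exact hs t ((s.dropWhile_sublist _).mem ht)
      rw [← List.cons_append, ih _ _ _ hs']
      simp only [List.takeWhile_cons, decide_eq_true_eq, if_pos hax,
        List.length_append, List.length_cons, List.length_nil]
      congr 1
      push_cast
      ring
    · have h1 : (s ++ [a]).dropWhile (fun t => decide (x < t)) = [] := by
        rw [List.dropWhile_eq_nil_iff]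
        intro t ht
        rcases List.mem_append.mp ht with ht | ht
        · have := hs t ht; simp; omega
        · simp at ht; subst ht; simp; omega
      have h2 : s.dropWhile (fun t => decide (x < t)) = [] := by
        rw [List.dropWhile_eq_nil_iff]
        intro t ht
        have := hs t ht; simp; omega
      simp only [bLoop, h1, h2]
      simp [show ¬ a ≤ x from hax]

theorem bLoop_eq_specSum : ∀ (l : List Int), bLoop l [] 0 = specSum l := by
  intro l
  induction l with
  | nil => simp [bLoop, specSum]
  | cons a l ih =>
    simp only [bLoop, List.dropWhile_nil, List.length_cons, List.length_nil]
    rw [show ([a] : List Int) = [] ++ [a] by simp, bLoop_bottom l [] a _ (by simp)]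
    rw [show (0 : Int) + (((0 : Nat) + 1 : Nat) : Int)
          + ((l.takeWhile (fun x => decide (a ≤ x))).length : Int)
          = 0 + (1 + ((l.takeWhile (fun x => decide (a ≤ x))).length : Int)) by push_cast; ring,
        bLoop_add, ih]
    simp only [specSum]
    ring

-- ---- A side ----

def gNat (l : List Int) (k : Nat) : Int :=
  ((l.drop (k + 1)).takeWhile (fun x => decide (l.getD k 0 ≤ x))).length

theorem innerA_eq (nums : List Int) (vi : Int) : ∀ (d j : Nat) (res : Int),
    nums.length ≤ j + d →
    innerA nums vi (PySem.List.pyRange (j : Int) (nums.length : Int) 1) res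
      = res + (((nums.drop j).takeWhile (fun x => decide (vi ≤ x))).length : Int) := by
  intro d
  induction d with
  | zero =>
    intro j res hj
    rw [PySem.List.pyRange_one_eq_nil (by exact_mod_cast hj),
      List.drop_eq_nil_of_le (by omega)]
    simp [innerA]
  | succ d ih =>
    intro j res hj
    by_cases hjn : j < nums.length
    · rw [PySem.List.pyRange_one_cons (by exact_mod_cast hjn)]
      have hdrop : nums.drop j = nums[j] :: nums.drop (j + 1) :=
        List.drop_eq_getElem_cons hjn
      simp only [innerA, PySem.List.pyGetD_natCast, List.getD_eq_getElem?_getD,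
        List.getElem?_eq_getElem hjn, Option.getD_some, hdrop, List.takeWhile_cons]
      by_cases hv : vi ≤ nums[j]
      · rw [if_pos (by simpa using hv)]
        rw [show ((j : Int) + 1) = ((j + 1 : Nat) : Int) by push_cast; ring,
          ih (j + 1) (res + 1) (by omega)]
        simp [hv]
        ring
      · rw [if_neg (by simpa using hv)]
        simp [hv]
    · rw [PySem.List.pyRange_one_eq_nil (by exact_mod_cast (by omega : nums.length ≤ j)),
        List.drop_eq_nil_of_le (by omega)]
      simp [innerA]

theorem sum_gNat (l : List Int) :
    (l.length : Int) + ((List.range (l.length - 1)).map (gNat l)).sum = specSum l := by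
  induction l with
  | nil => simp [specSum]
  | cons a l ih =>
    simp only [List.length_cons, Nat.add_sub_cancel, specSum]
    cases l with
    | nil => simp [specSum]
    | cons b l' =>
      rw [show (b :: l').length = ((b :: l').length - 1) + 1 by simp, List.range_succ_eq_map]
      have hshift : ∀ k : Nat, gNat (a :: b :: l') (k + 1) = gNat (b :: l') k := by
        intro k; simp [gNat]
      have h0 : gNat (a :: b :: l') 0
          = (((b :: l').takeWhile (fun x => decide (a ≤ x))).length : Int) := by
        simp [gNat]
      rw [List.map_cons, List.map_map]
      have : (List.map (gNat (a :: b :: l') ∘ Nat.succ) (List.range ((b :: l').length - 1)))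
          = List.map (gNat (b :: l')) (List.range ((b :: l').length - 1)) := by
        apply List.map_congr_left
        intro k _
        exact hshift k
      rw [this, List.sum_cons, h0, ← ih]
      simp only [List.length_cons, Nat.add_sub_cancel]
      push_cast
      ring

-- ===== VERDICT (by name: the statement is the Claim_ definition above) =====
theorem validSubarrays2_spec : Claim_equal_validSubarrays2 := by
  intro nums _
  unfold Spec_validSubarrays2 validSubarrays2 validSubarrays2_alt
  rw [bLoop_eq_specSum]
  have hcongr : ∀ (res : Int), ∀ i ∈ PySem.List.pyRange 0 ((nums.length : Int) - 1) 1,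
      innerA nums (PySem.List.pyGetD nums i 0)
        (PySem.List.pyRange (i + 1) (nums.length : Int) 1) res
      = res + gNat nums i.toNat := by
    intro res i hi
    have hmem := (PySem.List.mem_pyRange_one).mp hi
    have h0 : 0 ≤ i := hmem.1
    have hjn : i = ((i.toNat : Nat) : Int) := by omega
    rw [hjn, show (((i.toNat : Nat) : Int) + 1) = ((i.toNat + 1 : Nat) : Int) by push_cast; ring]
    rw [innerA_eq nums _ nums.length (i.toNat + 1) res (by omega)]
    rw [PySem.List.pyGetD_natCast]
    rfl
  rw [PySem.List.foldl_congr_mem _ _ (fun res i => res + gNat nums i.toNat) _ hcongr]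
  rw [PySem.List.foldl_add]
  rw [PySem.List.pyRange_one]
  rw [List.map_map]
  have hmaps : (List.map ((fun i => gNat nums i.toNat) ∘ fun k : Nat => (0 : Int) + k)
      (List.range (((nums.length : Int) - 1 - 0).toNat)))
      = List.map (gNat nums) (List.range (nums.length - 1)) := by
    have hlen : (((nums.length : Int) - 1 - 0)).toNat = nums.length - 1 := by omega
    rw [hlen]
    apply List.map_congr_left
    intro k _
    simp
  rw [hmaps, sum_gNat]
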